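-- pv_equiv track=rewrite | github.com/phongphung/Profile_team_small_portal | other_tool/edit_csv.py | edit_linkedin
-- ===== SOURCE A (Python) =====
-- def edit_linkedin(linkedin):
--     linkedin = linkedin.split('; ')
--     linkedin.sort()
--     new_linkedin = []
--
--     for i in range(len(linkedin)):
--         if not linkedin[i].endswith('linkedin.com/') and 'shareArticle' not in linkedin[i]:
--             if len(new_linkedin) == 0 or new_linkedin[-1] != linkedin[i]:
--                 new_linkedin.append(linkedin[i])
--
--     return '"' + '; '.join(new_linkedin) + '"'
-- ===== SOURCE B (Python) =====
-- def edit_linkedin(linkedin):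
--     # single pass: keep a sorted, duplicate-free list by ordered insertion
--     # (insertion sort with dedup) instead of sort-then-scan
--     def insert_unique(u, xs):
--         if not xs or u < xs[0]:
--             return [u] + xs
--         if u == xs[0]:
--             return xs
--         return [xs[0]] + insert_unique(u, xs[1:])
--
--     out = []
--     for u in linkedin.split('; '):
--         if u.endswith('linkedin.com/') or 'shareArticle' in u:
--             continue
--         out = insert_unique(u, out)
--     return '"' + '; '.join(out) + '"'
-- ===== Notes on version B (the rewrite author's own statement) =====
-- stated objective: alternative
-- what changed: Replaces A's library-sort followed by a scan with a consecutive-duplicate branch by a single pass that maintains a sorted duplicate-free accumulator via recursive ordered insertion (insertion sort with dedup); no sort call and no adjacency-based dedup remain.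
import Mathlib
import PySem

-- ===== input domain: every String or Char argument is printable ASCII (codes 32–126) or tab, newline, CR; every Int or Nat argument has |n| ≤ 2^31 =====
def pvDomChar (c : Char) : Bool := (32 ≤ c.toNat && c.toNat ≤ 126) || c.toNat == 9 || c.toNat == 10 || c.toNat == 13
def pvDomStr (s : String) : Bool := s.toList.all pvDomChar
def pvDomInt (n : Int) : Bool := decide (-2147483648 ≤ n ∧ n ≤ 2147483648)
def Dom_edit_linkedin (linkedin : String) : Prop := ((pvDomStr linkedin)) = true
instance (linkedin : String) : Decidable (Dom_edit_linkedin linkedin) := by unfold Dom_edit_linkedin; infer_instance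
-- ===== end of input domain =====

-- B replaces A's sort-then-scan-with-consecutive-duplicate-branch by a single pass
-- maintaining a sorted duplicate-free accumulator via recursive ordered insertion (alternative).


-- ===== PORT A =====
-- split, sort, then scan: append each kept part unless it equals the previously
-- appended one (new_linkedin[-1] ported as PySem.List.pyGet? acc (-1))
def edit_linkedin (linkedin : String) : String :=
  let parts := (PySem.Str.split? linkedin "; ").getD []
  let sortedParts := PySem.List.sorted parts id
  let newLinkedin := sortedParts.foldl (fun acc x =>
    if !(PySem.Str.endswith x "linkedin.com/") && !(PySem.Str.isIn "shareArticle" x) then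
      if acc.length = 0 ∨ PySem.List.pyGet? acc (-1) ≠ some x then acc ++ [x] else acc
    else acc) []
  PySem.Str.join "" ["\"", PySem.Str.join "; " newLinkedin, "\""]

-- ===== PORT B =====
-- recursive ordered insertion keeping the accumulator sorted and duplicate-free
def insertUnique (u : String) : List String → List String
  | [] => [u]
  | x :: t => if u < x then u :: x :: t else if u = x then x :: t else x :: insertUnique u t

-- single pass over the split parts: skip filtered parts, insert the rest in order
def edit_linkedin_alt (linkedin : String) : String :=
  let out := ((PySem.Str.split? linkedin "; ").getD []).foldl (fun acc u =>
    if PySem.Str.endswith u "linkedin.com/" || PySem.Str.isIn "shareArticle" u then acc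
    else insertUnique u acc) []
  PySem.Str.join "" ["\"", PySem.Str.join "; " out, "\""]

-- ===== PRECONDITION & SPEC =====
def Spec_edit_linkedin (linkedin : String) (out : String) : Prop := out = edit_linkedin_alt linkedin
instance (linkedin : String) (out : String) : Decidable (Spec_edit_linkedin linkedin out) := by unfold Spec_edit_linkedin; infer_instance

-- ===== CLAIM (what is proved, stated in full; the proofs are below) =====
def Claim_equal_edit_linkedin : Prop := ∀ (linkedin : String), Dom_edit_linkedin linkedin → Spec_edit_linkedin linkedin (edit_linkedin linkedin)

-- ===== LEMMAS AND PROOFS =====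

-- new_linkedin[-1] is the last element of the accumulator
lemma pyGet_neg_one_eq_getLast? (acc : List String) :
    PySem.List.pyGet? acc (-1) = acc.getLast? := by
  cases acc with
  | nil => simp [PySem.List.pyGet?, PySem.List.pyIdx?]
  | cons a t =>
    simp [PySem.List.pyGet?, PySem.List.pyIdx?, List.getLast?_eq_getElem?]

-- in a ≤-sorted list every member is at most the last element
lemma mem_le_getLast? : ∀ (l : List String), l.Pairwise (· ≤ ·) →
    ∀ a ∈ l, ∀ m, l.getLast? = some m → a ≤ m := by
  intro l
  induction l with
  | nil => intro _ a ha; simp at ha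
  | cons x t ih =>
    intro h a ha m hm
    cases t with
    | nil => simp at ha hm; simp [ha, hm]
    | cons y u =>
      rw [List.getLast?_cons_cons] at hm
      rcases List.mem_cons.mp ha with rfl | ha'
      · exact le_trans ((List.pairwise_cons.mp h).1 y (List.mem_cons_self ..))
          (ih (List.pairwise_cons.mp h).2 y (List.mem_cons_self ..) m hm)
      · exact ih (List.pairwise_cons.mp h).2 a ha' m hm

-- invariant of A's scan over the sorted list: the accumulator stays strictly
-- increasing and its members are exactly the old members plus the kept parts
lemma fold_invariant (p : String → Bool) (l acc : List String)
    (hl : l.Pairwise (· ≤ ·))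
    (hacc : acc.Pairwise (· < ·))
    (hle : ∀ a ∈ acc, ∀ x ∈ l, a ≤ x) :
    (l.foldl (fun acc x =>
      if p x then
        if acc.length = 0 ∨ PySem.List.pyGet? acc (-1) ≠ some x then acc ++ [x] else acc
      else acc) acc).Pairwise (· < ·) ∧
    ∀ y, y ∈ (l.foldl (fun acc x =>
      if p x then
        if acc.length = 0 ∨ PySem.List.pyGet? acc (-1) ≠ some x then acc ++ [x] else acc
      else acc) acc) ↔ (y ∈ acc ∨ (y ∈ l ∧ p y = true)) := by
  induction l generalizing acc with
  | nil => simpa using hacc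
  | cons x t ih =>
    have hxle : ∀ z ∈ t, x ≤ z := fun z hz => (List.pairwise_cons.mp hl).1 z hz
    have htl : t.Pairwise (· ≤ ·) := (List.pairwise_cons.mp hl).2
    simp only [List.foldl_cons]
    by_cases hp : p x = true
    · simp only [hp, if_true]
      by_cases hnew : acc.length = 0 ∨ PySem.List.pyGet? acc (-1) ≠ some x
      · simp only [if_pos hnew]
        have hacc' : (acc ++ [x]).Pairwise (· < ·) := by
          rw [List.pairwise_append]
          refine ⟨hacc, List.pairwise_singleton _ _, ?_⟩
          intro a ha b hb
          simp only [List.mem_singleton] at hb; subst hb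
          have hax : a ≤ b := hle a ha b (List.mem_cons_self ..)
          rcases lt_or_eq_of_le hax with h | h
          · exact h
          · exfalso
            subst h
            rcases hnew with h0 | hne
            · exact absurd ha (by simp [List.length_eq_zero_iff.mp h0])
            · rw [pyGet_neg_one_eq_getLast?] at hne
              have hne' : acc ≠ [] := by intro h; simp [h] at ha
              have hm : acc.getLast? = some (acc.getLast hne') := List.getLast?_eq_some_getLast hne'
              have h1 : a ≤ acc.getLast hne' :=
                mem_le_getLast? acc (hacc.imp (fun h => le_of_lt h)) a ha _ hm
              have h2 : acc.getLast hne' ≤ a :=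
                hle _ (List.getLast_mem hne') a (List.mem_cons_self ..)
              exact hne (by rw [hm, le_antisymm h1 h2])
        have hle' : ∀ a ∈ acc ++ [x], ∀ z ∈ t, a ≤ z := by
          intro a ha z hz
          rcases List.mem_append.mp ha with ha' | ha'
          · exact le_trans (hle a ha' x (List.mem_cons_self ..)) (hxle z hz)
          · simp only [List.mem_singleton] at ha'; subst ha'; exact hxle z hz
        rcases ih (acc ++ [x]) htl hacc' hle' with ⟨h1, h2⟩
        refine ⟨h1, fun y => ?_⟩
        rw [h2 y]
        simp only [List.mem_append, List.mem_cons, List.not_mem_nil, or_false]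
        constructor
        · rintro ((hy | rfl) | ⟨hy, hpy⟩)
          · exact Or.inl hy
          · exact Or.inr ⟨Or.inl rfl, hp⟩
          · exact Or.inr ⟨Or.inr hy, hpy⟩
        · rintro (hy | ⟨rfl | hy, hpy⟩)
          · exact Or.inl (Or.inl hy)
          · exact Or.inl (Or.inr rfl)
          · exact Or.inr ⟨hy, hpy⟩
      · simp only [if_neg hnew]
        rw [not_or, not_not] at hnew
        have hxmem : x ∈ acc := by
          rw [pyGet_neg_one_eq_getLast?] at hnew
          exact List.mem_of_getLast? hnew.2
        rcases ih acc htl hacc (fun a ha z hz =>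
          le_trans (hle a ha x (List.mem_cons_self ..)) (hxle z hz)) with ⟨h1, h2⟩
        refine ⟨h1, fun y => ?_⟩
        rw [h2 y]
        simp only [List.mem_cons]
        constructor
        · rintro (hy | ⟨hy, hpy⟩)
          · exact Or.inl hy
          · exact Or.inr ⟨Or.inr hy, hpy⟩
        · rintro (hy | ⟨rfl | hy, hpy⟩)
          · exact Or.inl hy
          · exact Or.inl hxmem
          · exact Or.inr ⟨hy, hpy⟩
    · simp only [if_neg hp]
      rcases ih acc htl hacc (fun a ha z hz =>
        le_trans (hle a ha x (List.mem_cons_self ..)) (hxle z hz)) with ⟨h1, h2⟩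
      refine ⟨h1, fun y => ?_⟩
      rw [h2 y]
      simp only [List.mem_cons]
      constructor
      · rintro (hy | ⟨hy, hpy⟩)
        · exact Or.inl hy
        · exact Or.inr ⟨Or.inr hy, hpy⟩
      · rintro (hy | ⟨rfl | hy, hpy⟩)
        · exact Or.inl hy
        · exact absurd hpy hp
        · exact Or.inr ⟨hy, hpy⟩

-- membership in insertUnique
lemma mem_insertUnique (u : String) : ∀ (xs : List String) (y : String),
    y ∈ insertUnique u xs ↔ y = u ∨ y ∈ xs := by
  intro xs
  induction xs with
  | nil => intro y; simp [insertUnique]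
  | cons x t ih =>
    intro y
    simp only [insertUnique]
    split_ifs with h1 h2
    · simp [List.mem_cons]
    · subst h2; simp [List.mem_cons]
    · simp only [List.mem_cons, ih y]; tauto

-- insertUnique preserves strict sortedness
lemma pairwise_insertUnique (u : String) : ∀ (xs : List String),
    xs.Pairwise (· < ·) → (insertUnique u xs).Pairwise (· < ·) := by
  intro xs
  induction xs with
  | nil => intro _; simp [insertUnique]
  | cons x t ih =>
    intro h
    rcases List.pairwise_cons.mp h with ⟨hx, ht⟩
    simp only [insertUnique]
    split_ifs with h1 h2
    · refine List.pairwise_cons.mpr ⟨?_, h⟩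
      intro a ha
      rcases List.mem_cons.mp ha with rfl | ha'
      · exact h1
      · exact lt_trans h1 (hx a ha')
    · exact h
    · have hxu : x < u := lt_of_le_of_ne (le_of_not_gt h1) (fun h => h2 h.symm)
      refine List.pairwise_cons.mpr ⟨?_, ih ht⟩
      intro a ha
      rcases (mem_insertUnique u t a).mp ha with rfl | ha'
      · exact hxu
      · exact hx a ha'

-- invariant of B's single pass: the accumulator is strictly sorted and its
-- members are the old members plus the kept parts seen so far
lemma foldB_invariant (p : String → Bool) (l acc : List String)
    (hacc : acc.Pairwise (· < ·)) :
    (l.foldl (fun acc u => if p u = true then insertUnique u acc else acc) acc).Pairwise (· < ·) ∧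
    ∀ y, y ∈ (l.foldl (fun acc u => if p u = true then insertUnique u acc else acc) acc) ↔
      (y ∈ acc ∨ (y ∈ l ∧ p y = true)) := by
  induction l generalizing acc with
  | nil => simpa using hacc
  | cons x t ih =>
    simp only [List.foldl_cons]
    by_cases hp : p x = true
    · simp only [hp, if_true]
      rcases ih (insertUnique x acc) (pairwise_insertUnique x acc hacc) with ⟨h1, h2⟩
      refine ⟨h1, fun y => ?_⟩
      rw [h2 y, mem_insertUnique]
      simp only [List.mem_cons]
      constructor
      · rintro ((rfl | hy) | ⟨hy, hpy⟩)
        · exact Or.inr ⟨Or.inl rfl, hp⟩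
        · exact Or.inl hy
        · exact Or.inr ⟨Or.inr hy, hpy⟩
      · rintro (hy | ⟨rfl | hy, hpy⟩)
        · exact Or.inl (Or.inr hy)
        · exact Or.inl (Or.inl rfl)
        · exact Or.inr ⟨hy, hpy⟩
    · simp only [if_neg hp]
      rcases ih acc hacc with ⟨h1, h2⟩
      refine ⟨h1, fun y => ?_⟩
      rw [h2 y]
      simp only [List.mem_cons]
      constructor
      · rintro (hy | ⟨hy, hpy⟩)
        · exact Or.inl hy
        · exact Or.inr ⟨Or.inr hy, hpy⟩
      · rintro (hy | ⟨rfl | hy, hpy⟩)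
        · exact Or.inl hy
        · exact absurd hpy hp
        · exact Or.inr ⟨hy, hpy⟩

-- the heart of the equivalence: both scans produce the same strictly sorted list
lemma scans_agree (p : String → Bool) (parts : List String) :
    ((PySem.List.sorted parts id).foldl (fun acc x =>
      if p x then
        if acc.length = 0 ∨ PySem.List.pyGet? acc (-1) ≠ some x then acc ++ [x] else acc
      else acc) []) =
    (parts.foldl (fun acc u => if p u = true then insertUnique u acc else acc) []) := by
  have hS : (PySem.List.sorted parts id).Pairwise (· ≤ ·) := by
    have := PySem.List.sorted_pairwise parts id
    simpa using this
  rcases fold_invariant p (PySem.List.sorted parts id) [] hS (by simp) (by simp) with ⟨ha1, ha2⟩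
  rcases foldB_invariant p parts [] (by simp) with ⟨hb1, hb2⟩
  refine List.Perm.eq_of_pairwise (fun a b _ _ h1 h2 => absurd h2 (asymm h1)) ha1 hb1 ?_
  rw [List.perm_ext_iff_of_nodup (ha1.imp (fun h => ne_of_lt h)) (hb1.imp (fun h => ne_of_lt h))]
  intro y
  rw [ha2 y, hb2 y, (PySem.List.sorted_perm parts id false).mem_iff]

-- ===== VERDICT (by name: the statement is the Claim_ definition above) =====
theorem edit_linkedin_spec : Claim_equal_edit_linkedin := by
  unfold Claim_equal_edit_linkedin Spec_edit_linkedin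
  intro linkedin _
  simp only [edit_linkedin, edit_linkedin_alt]
  rw [scans_agree (fun x => !(PySem.Str.endswith x "linkedin.com/") && !(PySem.Str.isIn "shareArticle" x))]
  rw [PySem.List.foldl_congr_mem ((PySem.Str.split? linkedin "; ").getD []) _
    (fun acc u => if PySem.Str.endswith u "linkedin.com/" || PySem.Str.isIn "shareArticle" u then acc
      else insertUnique u acc) []
    (fun acc u _ => by
      by_cases h1 : PySem.Chars.endswith u.toList ['l','i','n','k','e','d','i','n','.','c','o','m','/'] <;>
        by_cases h2 : PySem.Chars.isIn ['s','h','a','r','e','A','r','t','i','c','l','e'] u.toList <;>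
          simp [h1, h2])]
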